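-- pv_equiv track=rewrite | github.com/xvanov/algorithms | a1/turnin.py | not_brute3
-- ===== SOURCE A (Python) =====
-- def not_brute3(dims, dat):
--     small = min(dims)
--     rows = []
--     cols = []
--     res = 0
--
--     max_rows = [(0,0)]
--     max_cols = [(0,0)]
--
--     cols = [dat[0]]
--     for x in range(dims[0]):
--         row = [dat[x][0]]
--         col = []
--         for y in range(dims[1]):
--             if y+1<dims[1]:
--                 row.append((row[y][0] + dat[x][y+1][0], row[y][1] + dat[x][y+1][1]))
--             if x+1<dims[0]:
--                 col.append((cols[x][y][0] + dat[x+1][y][0], cols[x][y][1] + dat[x+1][y][1]))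
--         rows.append(row)
--         if x+1<dims[0]:
--             cols.append(col)
--
--     for i in range(small,0,-1):
--         for x in range(dims[0]-i):
--             for y in range(dims[1]-i):
--                 if res > 4*i:
--                     break
--                 else:
--                     if y == 0:
--                         top = (rows[x][y+i][0],rows[x][y+i][1])
--                         bottom = (rows[x+i][y+i][0],rows[x+i][y+i][1])
--                     else:
--                         top = (rows[x][y+i][0] - rows[x][y-1][0],rows[x][y+i][1] - rows[x][y-1][1])
--                         bottom = (rows[x+i][y+i][0] - rows[x+i][y-1][0],rows[x+i][y+i][1] - rows[x+i][y-1][1])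
--                     left = (cols[x+i-1][y][0] - cols[x][y][0],cols[x+i-1][y][1] - cols[x][y][1])
--                     right = (cols[x+i-1][y+i][0] - cols[x][y+i][0],cols[x+i-1][y+i][1] - cols[x][y+i][1])
--                     square = (top[0]+bottom[0]+left[0]+right[0],top[1]+bottom[1]+left[1]+right[1])
--                     if square[0] >= 2*square[1]: #  tests 2*minerals < toxics
--                         if square[0] > res:
--                             res = square[0]
--
--     return res
-- ===== SOURCE B (Python) =====
-- def not_brute3(dims, dat):
--     small = min(dims)
--     res = 0
--     for i in range(small, 0, -1):
--         for x in range(dims[0] - i):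
--             for y in range(dims[1] - i):
--                 if res > 4 * i:
--                     break
--                 a0 = 0
--                 a1 = 0
--                 for c in range(y, y + i + 1):
--                     a0 += dat[x][c][0] + dat[x + i][c][0]
--                     a1 += dat[x][c][1] + dat[x + i][c][1]
--                 for r in range(x + 1, x + i):
--                     a0 += dat[r][y][0] + dat[r][y + i][0]
--                     a1 += dat[r][y][1] + dat[r][y + i][1]
--                 if a0 >= 2 * a1 and a0 > res:
--                     res = a0
--     return res
-- ===== Notes on version B (the rewrite author's own statement) =====
-- stated objective: simpler
-- what changed: B drops A's interleaved row/column prefix-sum table construction entirely and, inside the same three nested loops with the same early break, sums each square's border cells directly from dat (full top and bottom rows, interior cells of the two side columns).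
import Mathlib
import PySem

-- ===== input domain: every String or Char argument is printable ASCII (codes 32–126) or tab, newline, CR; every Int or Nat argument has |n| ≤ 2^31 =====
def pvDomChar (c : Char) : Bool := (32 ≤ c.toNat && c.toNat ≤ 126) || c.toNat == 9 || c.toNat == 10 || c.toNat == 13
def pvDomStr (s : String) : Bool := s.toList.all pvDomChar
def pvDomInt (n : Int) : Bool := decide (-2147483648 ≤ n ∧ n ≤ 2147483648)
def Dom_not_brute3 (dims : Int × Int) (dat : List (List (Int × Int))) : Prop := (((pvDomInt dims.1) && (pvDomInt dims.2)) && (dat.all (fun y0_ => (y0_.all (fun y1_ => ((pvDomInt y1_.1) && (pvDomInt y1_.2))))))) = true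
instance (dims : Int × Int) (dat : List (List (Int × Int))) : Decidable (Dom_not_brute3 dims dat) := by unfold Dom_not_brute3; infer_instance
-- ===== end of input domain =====

-- B drops A's row/col prefix-sum tables and sums each square's border cells directly
-- inside the same three loops (objective: simpler; return value identical on Pre_).

-- ===== PORT A =====
-- m[i][j] with defaults (indices are in range under Pre_)
def aGet (m : List (List (Int × Int))) (i j : Int) : Int × Int :=
  PySem.List.pyGetD (PySem.List.pyGetD m i []) j (0, 0)

-- the y-loop of A's phase 2, with the `break` as early return
def aYLoop (rows cols : List (List (Int × Int))) (i x : Int)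
    (ys : List Int) (res : Int) : Int :=
  match ys with
  | [] => res
  | y :: t =>
    if res > 4 * i then res
    else
      let top := if y = 0 then aGet rows x (y + i)
        else ((aGet rows x (y + i)).1 - (aGet rows x (y - 1)).1,
              (aGet rows x (y + i)).2 - (aGet rows x (y - 1)).2)
      let bottom := if y = 0 then aGet rows (x + i) (y + i)
        else ((aGet rows (x + i) (y + i)).1 - (aGet rows (x + i) (y - 1)).1,
              (aGet rows (x + i) (y + i)).2 - (aGet rows (x + i) (y - 1)).2)
      let left := ((aGet cols (x + i - 1) y).1 - (aGet cols x y).1,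
                   (aGet cols (x + i - 1) y).2 - (aGet cols x y).2)
      let right := ((aGet cols (x + i - 1) (y + i)).1 - (aGet cols x (y + i)).1,
                    (aGet cols (x + i - 1) (y + i)).2 - (aGet cols x (y + i)).2)
      let square := (top.1 + bottom.1 + left.1 + right.1, top.2 + bottom.2 + left.2 + right.2)
      let res' := if square.1 ≥ 2 * square.2 then (if square.1 > res then square.1 else res) else res
      aYLoop rows cols i x t res'

def not_brute3 (dims : Int × Int) (dat : List (List (Int × Int))) : Int :=
  let small := min dims.1 dims.2
  let st :=
    (PySem.List.pyRange 0 dims.1 1).foldl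
      (fun (st : List (List (Int × Int)) × List (List (Int × Int))) x =>
        let rows := st.1
        let cols := st.2
        let inner :=
          (PySem.List.pyRange 0 dims.2 1).foldl
            (fun (rc : List (Int × Int) × List (Int × Int)) y =>
              let row := rc.1
              let col := rc.2
              let row' := if y + 1 < dims.2 then
                  row ++ [((PySem.List.pyGetD row y (0, 0)).1 + (aGet dat x (y + 1)).1,
                           (PySem.List.pyGetD row y (0, 0)).2 + (aGet dat x (y + 1)).2)]
                else row
              let col' := if x + 1 < dims.1 then
                  col ++ [((aGet cols x y).1 + (aGet dat (x + 1) y).1,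
                           (aGet cols x y).2 + (aGet dat (x + 1) y).2)]
                else col
              (row', col'))
            ([PySem.List.pyGetD (PySem.List.pyGetD dat x []) 0 (0, 0)], ([] : List (Int × Int)))
        (rows ++ [inner.1], if x + 1 < dims.1 then cols ++ [inner.2] else cols))
      (([] : List (List (Int × Int))), [PySem.List.pyGetD dat 0 []])
  (PySem.List.pyRange small 0 (-1)).foldl
    (fun res i =>
      (PySem.List.pyRange 0 (dims.1 - i) 1).foldl
        (fun res x => aYLoop st.1 st.2 i x (PySem.List.pyRange 0 (dims.2 - i) 1) res)
        res)
    0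

-- ===== PORT B =====
-- dat[r][c] with defaults (indices are in range under Pre_)
def bGet (dat : List (List (Int × Int))) (r c : Int) : Int × Int :=
  PySem.List.pyGetD (PySem.List.pyGetD dat r []) c (0, 0)

-- border sum of the square with corners (x,y)-(x+i,y+i): the two full horizontal
-- edges, then the interior cells of the two vertical edges
def bBorder (dat : List (List (Int × Int))) (i x y : Int) : Int × Int :=
  let p :=
    (PySem.List.pyRange y (y + i + 1) 1).foldl
      (fun (a : Int × Int) c =>
        (a.1 + (bGet dat x c).1 + (bGet dat (x + i) c).1,
         a.2 + (bGet dat x c).2 + (bGet dat (x + i) c).2))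
      (0, 0)
  (PySem.List.pyRange (x + 1) (x + i) 1).foldl
    (fun (a : Int × Int) r =>
      (a.1 + (bGet dat r y).1 + (bGet dat r (y + i)).1,
       a.2 + (bGet dat r y).2 + (bGet dat r (y + i)).2))
    p

def bYLoop (dat : List (List (Int × Int))) (i x : Int) (ys : List Int) (res : Int) : Int :=
  match ys with
  | [] => res
  | y :: t =>
    if res > 4 * i then res
    else
      let a := bBorder dat i x y
      let res' := if a.1 ≥ 2 * a.2 ∧ a.1 > res then a.1 else res
      bYLoop dat i x t res'

def not_brute3_alt (dims : Int × Int) (dat : List (List (Int × Int))) : Int :=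
  let small := min dims.1 dims.2
  (PySem.List.pyRange small 0 (-1)).foldl
    (fun res i =>
      (PySem.List.pyRange 0 (dims.1 - i) 1).foldl
        (fun res x => bYLoop dat i x (PySem.List.pyRange 0 (dims.2 - i) 1) res)
        res)
    0

-- ===== PRECONDITION & SPEC =====
-- Pre_ excludes exactly the inputs where Python A raises IndexError: an empty dat
-- (A always reads dat[0]), or dims.1 > 0 with fewer than dims.1 rows, or one of the
-- first dims.1 rows shorter than max(dims.2, 1).
def Pre_not_brute3 (dims : Int × Int) (dat : List (List (Int × Int))) : Prop :=
  dat ≠ [] ∧ (0 < dims.1 → dims.1 ≤ (dat.length : Int) ∧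
    ∀ r ∈ dat.take dims.1.toNat, max dims.2 1 ≤ (r.length : Int))
instance (dims : Int × Int) (dat : List (List (Int × Int))) : Decidable (Pre_not_brute3 dims dat) := by unfold Pre_not_brute3; infer_instance

def pvWitness_not_brute3 : (Int × Int) × (List (List (Int × Int))) :=
  ((2, 2), [[(3, 1), (2, 0)], [(1, 1), (4, 0)]])

def Spec_not_brute3 (dims : Int × Int) (dat : List (List (Int × Int))) (out : Int) : Prop := out = not_brute3_alt dims dat
instance (dims : Int × Int) (dat : List (List (Int × Int))) (out : Int) : Decidable (Spec_not_brute3 dims dat out) := by unfold Spec_not_brute3; infer_instance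

-- ===== CLAIM (what is proved, stated in full; the proofs are below) =====
def Claim_equal_not_brute3 : Prop := ∀ (dims : Int × Int) (dat : List (List (Int × Int))), Dom_not_brute3 dims dat → Pre_not_brute3 dims dat → Spec_not_brute3 dims dat (not_brute3 dims dat)

-- ===== LEMMAS AND PROOFS =====

-- reference cell access and the horizontal / vertical interval sums
def cell (dat : List (List (Int × Int))) (r c : Nat) : Int × Int :=
  (dat.getD r []).getD c (0, 0)

-- sum of row x over columns a, a+1, …, a+n-1
def hsum (dat : List (List (Int × Int))) (x a : Nat) : Nat → Int × Int
  | 0 => (0, 0)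
  | n + 1 => ((hsum dat x a n).1 + (cell dat x (a + n)).1,
              (hsum dat x a n).2 + (cell dat x (a + n)).2)

-- sum of column y over rows a, a+1, …, a+n-1
def vsum (dat : List (List (Int × Int))) (y a : Nat) : Nat → Int × Int
  | 0 => (0, 0)
  | n + 1 => ((vsum dat y a n).1 + (cell dat (a + n) y).1,
              (vsum dat y a n).2 + (cell dat (a + n) y).2)

def rowF (dat : List (List (Int × Int))) (D1 x : Nat) : List (Int × Int) :=
  (List.range D1).map (fun y => hsum dat x 0 (y + 1))

def colF (dat : List (List (Int × Int))) (D1 k : Nat) : List (Int × Int) :=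
  (List.range D1).map (fun y => vsum dat y 0 (k + 1))

-- A's phase-1 bodies, restated standalone (definitionally the ones inside not_brute3)
def aIBody (dims : Int × Int) (dat cols : List (List (Int × Int))) (x : Int)
    (rc : List (Int × Int) × List (Int × Int)) (y : Int) : List (Int × Int) × List (Int × Int) :=
  let row := rc.1
  let col := rc.2
  let row' := if y + 1 < dims.2 then
      row ++ [((PySem.List.pyGetD row y (0, 0)).1 + (aGet dat x (y + 1)).1,
               (PySem.List.pyGetD row y (0, 0)).2 + (aGet dat x (y + 1)).2)]
    else row
  let col' := if x + 1 < dims.1 then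
      col ++ [((aGet cols x y).1 + (aGet dat (x + 1) y).1,
               (aGet cols x y).2 + (aGet dat (x + 1) y).2)]
    else col
  (row', col')

def aOBody (dims : Int × Int) (dat : List (List (Int × Int)))
    (st : List (List (Int × Int)) × List (List (Int × Int))) (x : Int) :
    List (List (Int × Int)) × List (List (Int × Int)) :=
  let inner := (PySem.List.pyRange 0 dims.2 1).foldl (aIBody dims dat st.2 x)
    ([PySem.List.pyGetD (PySem.List.pyGetD dat x []) 0 (0, 0)], ([] : List (Int × Int)))
  (st.1 ++ [inner.1], if x + 1 < dims.1 then st.2 ++ [inner.2] else st.2)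

def phase1 (dims : Int × Int) (dat : List (List (Int × Int))) :
    List (List (Int × Int)) × List (List (Int × Int)) :=
  (PySem.List.pyRange 0 dims.1 1).foldl (aOBody dims dat)
    (([] : List (List (Int × Int))), [PySem.List.pyGetD dat 0 []])

lemma not_brute3_eq (dims : Int × Int) (dat : List (List (Int × Int))) :
    not_brute3 dims dat =
      (PySem.List.pyRange (min dims.1 dims.2) 0 (-1)).foldl
        (fun res i =>
          (PySem.List.pyRange 0 (dims.1 - i) 1).foldl
            (fun res x => aYLoop (phase1 dims dat).1 (phase1 dims dat).2 i x
              (PySem.List.pyRange 0 (dims.2 - i) 1) res) res) 0 := rfl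

lemma aGet_cell (dat : List (List (Int × Int))) (r c : Nat) :
    aGet dat (r : Int) (c : Int) = cell dat r c := by
  simp [aGet, cell, PySem.List.pyGetD_natCast]

lemma bGet_cell (dat : List (List (Int × Int))) (r c : Nat) :
    bGet dat (r : Int) (c : Int) = cell dat r c := by
  simp [bGet, cell, PySem.List.pyGetD_natCast]

lemma hsum_split (dat : List (List (Int × Int))) (x a m n : Nat) :
    hsum dat x a (m + n) =
      ((hsum dat x a m).1 + (hsum dat x (a + m) n).1,
       (hsum dat x a m).2 + (hsum dat x (a + m) n).2) := by
  induction n with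
  | zero => simp [hsum]
  | succ n ih =>
    rw [Nat.add_succ]
    simp only [hsum, ih, Prod.mk.injEq]
    refine ⟨?_, ?_⟩ <;> (rw [show a + (m + n) = a + m + n by omega]; ring)

lemma vsum_split (dat : List (List (Int × Int))) (y a m n : Nat) :
    vsum dat y a (m + n) =
      ((vsum dat y a m).1 + (vsum dat y (a + m) n).1,
       (vsum dat y a m).2 + (vsum dat y (a + m) n).2) := by
  induction n with
  | zero => simp [vsum]
  | succ n ih =>
    rw [Nat.add_succ]
    simp only [vsum, ih, Prod.mk.injEq]
    refine ⟨?_, ?_⟩ <;> (rw [show a + (m + n) = a + m + n by omega]; ring)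

-- pointwise access into the two tables
lemma rows_get (dat : List (List (Int × Int))) (D0 D1 a b : Nat) (ha : a < D0) (hb : b < D1) :
    aGet ((List.range D0).map (rowF dat D1)) (a : Int) (b : Int) = hsum dat a 0 (b + 1) := by
  simp only [aGet, PySem.List.pyGetD_natCast]
  rw [PySem.List.getD_map_range _ _ _ _ ha]
  unfold rowF
  rw [PySem.List.getD_map_range _ _ _ _ hb]

lemma cols_get (dat : List (List (Int × Int))) (D0 D1 k b : Nat) (hk : k < D0) (hb : b < D1) :
    aGet (PySem.List.pyGetD dat 0 [] :: (List.range (D0 - 1)).map (fun j => colF dat D1 (j + 1)))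
      (k : Int) (b : Int) = vsum dat b 0 (k + 1) := by
  cases k with
  | zero =>
    simp only [aGet, PySem.List.pyGetD_natCast, Nat.cast_zero, PySem.List.pyGetD_zero]
    simp [cell, vsum]
  | succ j =>
    simp only [aGet, PySem.List.pyGetD_natCast, List.getD_cons_succ]
    rw [PySem.List.getD_map_range _ _ _ _ (by omega : j < D0 - 1)]
    unfold colF
    rw [PySem.List.getD_map_range _ _ _ _ hb]

-- the inner (y) loop of phase 1 builds the prefix-sum row and the next column table
lemma inner_inv (dims : Int × Int) (dat cols : List (List (Int × Int))) (x D1 : Nat)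
    (hD1 : dims.2 = (D1 : Int))
    (hc : ∀ y < D1, aGet cols (x : Int) (y : Int) = vsum dat y 0 (x + 1)) :
    ∀ n t, t + n = D1 → 0 < n →
    (PySem.List.pyRange (t : Int) dims.2 1).foldl (aIBody dims dat cols (x : Int))
      ((List.range (t + 1)).map (fun y => hsum dat x 0 (y + 1)),
       if (x : Int) + 1 < dims.1 then (List.range t).map (fun y => vsum dat y 0 (x + 2)) else [])
    = (rowF dat D1 x,
       (if (x : Int) + 1 < dims.1 then colF dat D1 (x + 1) else ([] : List (Int × Int)))) := by
  intro n
  induction n with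
  | zero => intro t ht h0; omega
  | succ m ih =>
    intro t ht _
    have htD : t < D1 := by omega
    rw [PySem.List.pyRange_one_cons (show (t : Int) < dims.2 by rw [hD1]; omega),
      List.foldl_cons]
    have hrowget : PySem.List.pyGetD ((List.range (t + 1)).map (fun y => hsum dat x 0 (y + 1)))
        (t : Int) (0, 0) = hsum dat x 0 (t + 1) := by
      rw [PySem.List.pyGetD_natCast, PySem.List.getD_map_range _ _ _ _ (by omega : t < t + 1)]
    have hc' : cell cols x t = vsum dat t 0 (x + 1) := by
      rw [← aGet_cell]; exact hc t htD
    have hrow2 : (List.range (t + 1)).map (fun y => hsum dat x 0 (y + 1)) ++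
        [((hsum dat x 0 (t + 1)).1 + (cell dat x (t + 1)).1,
          (hsum dat x 0 (t + 1)).2 + (cell dat x (t + 1)).2)]
        = (List.range (t + 2)).map (fun y => hsum dat x 0 (y + 1)) := by
      conv_rhs => rw [show t + 2 = (t + 1) + 1 by omega, List.range_succ, List.map_append,
        List.map_singleton]
      congr 1
      simp [hsum]
    have hcol2 : (List.range t).map (fun y => vsum dat y 0 (x + 2)) ++
        [((vsum dat t 0 (x + 1)).1 + (cell dat (x + 1) t).1,
          (vsum dat t 0 (x + 1)).2 + (cell dat (x + 1) t).2)]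
        = (List.range (t + 1)).map (fun y => vsum dat y 0 (x + 2)) := by
      rw [List.range_succ, List.map_append, List.map_singleton]
      congr 1
      simp [vsum]
    have hde : ((t : Int) + 1) = ((t + 1 : Nat) : Int) := by omega
    have hxe : ((x : Int) + 1) = ((x + 1 : Nat) : Int) := by omega
    by_cases hx : ((x + 1 : Nat) : Int) < dims.1
    · by_cases hm : m = 0
      · -- last iteration: the row is complete, the col gains its final entry
        subst hm
        have hend : ¬ (((t + 1 : Nat) : Int) < dims.2) := by rw [hD1]; omega
        have hnil : PySem.List.pyRange ((t + 1 : Nat) : Int) dims.2 1 = [] :=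
          PySem.List.pyRange_one_eq_nil (by rw [hD1]; omega)
        simp only [aIBody, hde, hxe, if_pos hx, if_neg hend, hrowget, aGet_cell, hc',
          hcol2, hnil, List.foldl_nil]
        rw [show t + 1 = D1 by omega]
        simp [rowF, colF]
      · -- middle iteration: both lists grow, recurse
        have hmid : (((t + 1 : Nat) : Int) < dims.2) := by rw [hD1]; omega
        simp only [aIBody, hde, hxe, if_pos hx, if_pos hmid, hrowget, aGet_cell, hc',
          hrow2, hcol2]
        have h2 := ih (t + 1) (by omega) (by omega)
        simp only [hxe, if_pos hx] at h2
        exact h2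
    · by_cases hm : m = 0
      · subst hm
        have hend : ¬ (((t + 1 : Nat) : Int) < dims.2) := by rw [hD1]; omega
        have hnil : PySem.List.pyRange ((t + 1 : Nat) : Int) dims.2 1 = [] :=
          PySem.List.pyRange_one_eq_nil (by rw [hD1]; omega)
        simp only [aIBody, hde, hxe, if_neg hx, if_neg hend, hnil, List.foldl_nil]
        rw [show t + 1 = D1 by omega]
        simp [rowF]
      · have hmid : (((t + 1 : Nat) : Int) < dims.2) := by rw [hD1]; omega
        simp only [aIBody, hde, hxe, if_neg hx, if_pos hmid, hrowget, aGet_cell, hrow2]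
        have h2 := ih (t + 1) (by omega) (by omega)
        simp only [hxe, if_neg hx] at h2
        exact h2

-- phase 1 computes exactly the row/column prefix-sum tables
lemma outer_inv (dims : Int × Int) (dat : List (List (Int × Int))) (D0 D1 : Nat)
    (hD0 : dims.1 = (D0 : Int)) (hD1 : dims.2 = (D1 : Int)) (h1 : 0 < D1) :
    ∀ n t, t + n = D0 → 0 < n →
    (PySem.List.pyRange (t : Int) dims.1 1).foldl (aOBody dims dat)
      ((List.range t).map (rowF dat D1),
       PySem.List.pyGetD dat 0 [] :: (List.range t).map (fun k => colF dat D1 (k + 1)))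
    = ((List.range D0).map (rowF dat D1),
       PySem.List.pyGetD dat 0 [] :: (List.range (D0 - 1)).map (fun k => colF dat D1 (k + 1))) := by
  intro n
  induction n with
  | zero => intro t ht h0; omega
  | succ m ih =>
    intro t ht _
    have htD : t < D0 := by omega
    rw [PySem.List.pyRange_one_cons (show (t : Int) < dims.1 by rw [hD0]; omega),
      List.foldl_cons]
    have hcg : ∀ y < D1, aGet (PySem.List.pyGetD dat 0 [] ::
        (List.range t).map (fun k => colF dat D1 (k + 1))) (t : Int) (y : Int)
        = vsum dat y 0 (t + 1) :=
      fun y hy => cols_get dat (t + 1) D1 t y (by omega) hy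
    have h0 := inner_inv dims dat (PySem.List.pyGetD dat 0 [] ::
      (List.range t).map (fun k => colF dat D1 (k + 1))) t D1 hD1 hcg D1 0 (by omega) h1
    simp only [Nat.cast_zero, zero_add, List.range_one, List.range_zero, List.map_cons,
      List.map_nil, ite_self] at h0
    have e : PySem.List.pyGetD (PySem.List.pyGetD dat (t : Int) []) 0 (0, 0)
        = hsum dat t 0 1 := by
      simp [PySem.List.pyGetD_natCast, PySem.List.pyGetD_zero, hsum, cell]
    have hinner2 : (PySem.List.pyRange 0 dims.2 1).foldl
        (aIBody dims dat (PySem.List.pyGetD dat 0 [] ::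
          (List.range t).map (fun k => colF dat D1 (k + 1))) (t : Int))
        ([PySem.List.pyGetD (PySem.List.pyGetD dat (t : Int) []) 0 (0, 0)],
          ([] : List (Int × Int)))
      = (rowF dat D1 t, if (t : Int) + 1 < dims.1 then colF dat D1 (t + 1) else []) := by
      rw [e]; exact h0
    have hrows2 : (List.range t).map (rowF dat D1) ++ [rowF dat D1 t]
        = (List.range (t + 1)).map (rowF dat D1) := by
      rw [List.range_succ, List.map_append, List.map_singleton]
    by_cases hm : m = 0
    · -- last iteration: x+1 = dims.1, the col table is not extended
      subst hm
      have hx : ¬ ((t : Int) + 1 < dims.1) := by rw [hD0]; omega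
      have hnil : PySem.List.pyRange ((t : Int) + 1) dims.1 1 = [] :=
        PySem.List.pyRange_one_eq_nil (by rw [hD0]; omega)
      simp only [aOBody, hinner2, if_neg hx, hrows2, hnil, List.foldl_nil]
      rw [show t + 1 = D0 by omega, show t = D0 - 1 by omega]
    · -- middle iteration: both tables grow, recurse
      have hx : (t : Int) + 1 < dims.1 := by rw [hD0]; omega
      have hcols2 : (PySem.List.pyGetD dat 0 [] ::
          (List.range t).map (fun k => colF dat D1 (k + 1))) ++ [colF dat D1 (t + 1)]
          = PySem.List.pyGetD dat 0 [] ::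
            (List.range (t + 1)).map (fun k => colF dat D1 (k + 1)) := by
        rw [List.cons_append, List.range_succ, List.map_append, List.map_singleton]
      simp only [aOBody, hinner2, if_pos hx, hrows2, hcols2]
      have hde : ((t : Int) + 1) = ((t + 1 : Nat) : Int) := by omega
      rw [hde]
      exact ih (t + 1) (by omega) (by omega)

-- B's horizontal edge fold
lemma foldH (dat : List (List (Int × Int))) (x1 x2 b : Nat) :
    ∀ (n : Nat) (acc : Int × Int),
    (PySem.List.pyRange (b : Int) ((b : Int) + (n : Int)) 1).foldl
      (fun (a : Int × Int) c =>
        (a.1 + (bGet dat (x1 : Int) c).1 + (bGet dat (x2 : Int) c).1,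
         a.2 + (bGet dat (x1 : Int) c).2 + (bGet dat (x2 : Int) c).2)) acc
    = (acc.1 + (hsum dat x1 b n).1 + (hsum dat x2 b n).1,
       acc.2 + (hsum dat x1 b n).2 + (hsum dat x2 b n).2) := by
  intro n
  induction n with
  | zero =>
    intro acc
    rw [show ((b : Int) + ((0 : Nat) : Int)) = (b : Int) by push_cast; ring,
      PySem.List.pyRange_one_eq_nil le_rfl]
    simp [hsum]
  | succ n ih =>
    intro acc
    rw [show ((b : Int) + ((n + 1 : Nat) : Int)) = ((b : Int) + (n : Int)) + 1 by push_cast; ring,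
      PySem.List.pyRange_one_succ_right (by omega : (b : Int) ≤ (b : Int) + (n : Int)),
      List.foldl_append, ih]
    rw [show ((b : Int) + (n : Int)) = ((b + n : Nat) : Int) by push_cast; ring]
    simp only [List.foldl_cons, List.foldl_nil, bGet_cell, hsum, Prod.mk.injEq]
    exact ⟨by ring, by ring⟩

-- B's vertical edge fold
lemma foldV (dat : List (List (Int × Int))) (y1 y2 a : Nat) :
    ∀ (n : Nat) (acc : Int × Int),
    (PySem.List.pyRange (a : Int) ((a : Int) + (n : Int)) 1).foldl
      (fun (ac : Int × Int) r =>
        (ac.1 + (bGet dat r (y1 : Int)).1 + (bGet dat r (y2 : Int)).1,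
         ac.2 + (bGet dat r (y1 : Int)).2 + (bGet dat r (y2 : Int)).2)) acc
    = (acc.1 + (vsum dat y1 a n).1 + (vsum dat y2 a n).1,
       acc.2 + (vsum dat y1 a n).2 + (vsum dat y2 a n).2) := by
  intro n
  induction n with
  | zero =>
    intro acc
    rw [show ((a : Int) + ((0 : Nat) : Int)) = (a : Int) by push_cast; ring,
      PySem.List.pyRange_one_eq_nil le_rfl]
    simp [vsum]
  | succ n ih =>
    intro acc
    rw [show ((a : Int) + ((n + 1 : Nat) : Int)) = ((a : Int) + (n : Int)) + 1 by push_cast; ring,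
      PySem.List.pyRange_one_succ_right (by omega : (a : Int) ≤ (a : Int) + (n : Int)),
      List.foldl_append, ih]
    rw [show ((a : Int) + (n : Int)) = ((a + n : Nat) : Int) by push_cast; ring]
    simp only [List.foldl_cons, List.foldl_nil, bGet_cell, vsum, Prod.mk.injEq]
    exact ⟨by ring, by ring⟩

lemma bBorder_eq (dat : List (List (Int × Int))) (j a b : Nat) (hj : 0 < j) :
    bBorder dat (j : Int) (a : Int) (b : Int) =
      ((hsum dat a b (j + 1)).1 + (hsum dat (a + j) b (j + 1)).1
         + (vsum dat b (a + 1) (j - 1)).1 + (vsum dat (b + j) (a + 1) (j - 1)).1,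
       (hsum dat a b (j + 1)).2 + (hsum dat (a + j) b (j + 1)).2
         + (vsum dat b (a + 1) (j - 1)).2 + (vsum dat (b + j) (a + 1) (j - 1)).2) := by
  unfold bBorder
  have e2 : ((a : Int) + (j : Int)) = ((a + j : Nat) : Int) := by omega
  have e3 : ((b : Int) + (j : Int)) = ((b + j : Nat) : Int) := by omega
  simp only [e2, e3]
  rw [show ((b + j : Nat) : Int) + 1 = (b : Int) + ((j + 1 : Nat) : Int) by omega,
    foldH dat a (a + j) b (j + 1),
    show ((a : Int) + 1) = ((a + 1 : Nat) : Int) by omega,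
    show ((a + j : Nat) : Int) = ((a + 1 : Nat) : Int) + ((j - 1 : Nat) : Int) by omega,
    foldV dat b (b + j) (a + 1) (j - 1)]
  simp only [Prod.mk.injEq]
  exact ⟨by ring, by ring⟩

-- A's prefix-difference square equals B's direct border sum
lemma yloop_eq (dims : Int × Int) (dat rows cols : List (List (Int × Int))) (D0 D1 : Nat)
    (_hD0 : dims.1 = (D0 : Int)) (hD1 : dims.2 = (D1 : Int))
    (hR : ∀ a < D0, ∀ b < D1, aGet rows (a : Int) (b : Int) = hsum dat a 0 (b + 1))
    (hC : ∀ k < D0, ∀ b < D1, aGet cols (k : Int) (b : Int) = vsum dat b 0 (k + 1))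
    (j a : Nat) (hj : 0 < j) (ha : a + j < D0) :
    ∀ (ys : List Int), (∀ y ∈ ys, 0 ≤ y ∧ y + (j : Int) < dims.2) →
    ∀ res, aYLoop rows cols (j : Int) (a : Int) ys res = bYLoop dat (j : Int) (a : Int) ys res := by
  intro ys
  induction ys with
  | nil => intro _ res; rfl
  | cons y t ihy =>
    intro hys res
    obtain ⟨hy0, hyd⟩ := hys y (List.mem_cons_self ..)
    obtain ⟨b, rfl⟩ : ∃ b : Nat, y = (b : Int) := ⟨y.toNat, (Int.toNat_of_nonneg hy0).symm⟩
    have hb : b + j < D1 := by rw [hD1] at hyd; omega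
    simp only [aYLoop, bYLoop]
    by_cases hres : res > 4 * (j : Int)
    · rw [if_pos hres, if_pos hres]
    · rw [if_neg hres, if_neg hres]
      have step : ∀ X Y : Int, X = Y →
          aYLoop rows cols (j : Int) (a : Int) t X = bYLoop dat (j : Int) (a : Int) t Y :=
        fun X Y h => h ▸ ihy (fun z hz => hys z (List.mem_cons_of_mem _ hz)) X
      apply step
      -- cast normalisations
      have c1 : ((b : Int) + (j : Int)) = ((b + j : Nat) : Int) := by omega
      have c2 : ((a : Int) + (j : Int)) = ((a + j : Nat) : Int) := by omega
      have c3 : (((a + j : Nat) : Int) - 1) = ((a + j - 1 : Nat) : Int) := by omega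
      -- the eight table reads, as interval sums
      have r1 : aGet rows (a : Int) ((b + j : Nat) : Int) = hsum dat a 0 (b + j + 1) :=
        hR a (by omega) (b + j) hb
      have r2 : aGet rows ((a + j : Nat) : Int) ((b + j : Nat) : Int)
          = hsum dat (a + j) 0 (b + j + 1) := hR (a + j) (by omega) (b + j) hb
      have k1 : aGet cols ((a + j - 1 : Nat) : Int) (b : Int) = vsum dat b 0 (a + j) := by
        have h := hC (a + j - 1) (by omega) b (by omega)
        rw [show a + j - 1 + 1 = a + j by omega] at h
        exact h
      have k2 : aGet cols (a : Int) (b : Int) = vsum dat b 0 (a + 1) :=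
        hC a (by omega) b (by omega)
      have k3 : aGet cols ((a + j - 1 : Nat) : Int) ((b + j : Nat) : Int)
          = vsum dat (b + j) 0 (a + j) := by
        have h := hC (a + j - 1) (by omega) (b + j) hb
        rw [show a + j - 1 + 1 = a + j by omega] at h
        exact h
      have k4 : aGet cols (a : Int) ((b + j : Nat) : Int) = vsum dat (b + j) 0 (a + 1) :=
        hC a (by omega) (b + j) hb
      -- telescoping of the prefix sums
      have t1 := hsum_split dat a 0 b (j + 1)
      rw [show b + (j + 1) = b + j + 1 by omega, Nat.zero_add] at t1
      have T1a : (hsum dat a 0 (b + j + 1)).1 = (hsum dat a 0 b).1 + (hsum dat a b (j + 1)).1 := by rw [t1]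
      have T1b : (hsum dat a 0 (b + j + 1)).2 = (hsum dat a 0 b).2 + (hsum dat a b (j + 1)).2 := by rw [t1]
      have t2 := hsum_split dat (a + j) 0 b (j + 1)
      rw [show b + (j + 1) = b + j + 1 by omega, Nat.zero_add] at t2
      have T2a : (hsum dat (a + j) 0 (b + j + 1)).1 = (hsum dat (a + j) 0 b).1 + (hsum dat (a + j) b (j + 1)).1 := by rw [t2]
      have T2b : (hsum dat (a + j) 0 (b + j + 1)).2 = (hsum dat (a + j) 0 b).2 + (hsum dat (a + j) b (j + 1)).2 := by rw [t2]
      have t3 := vsum_split dat b 0 (a + 1) (j - 1)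
      rw [show a + 1 + (j - 1) = a + j by omega, Nat.zero_add] at t3
      have T3a : (vsum dat b 0 (a + j)).1 = (vsum dat b 0 (a + 1)).1 + (vsum dat b (a + 1) (j - 1)).1 := by rw [t3]
      have T3b : (vsum dat b 0 (a + j)).2 = (vsum dat b 0 (a + 1)).2 + (vsum dat b (a + 1) (j - 1)).2 := by rw [t3]
      have t4 := vsum_split dat (b + j) 0 (a + 1) (j - 1)
      rw [show a + 1 + (j - 1) = a + j by omega, Nat.zero_add] at t4
      have T4a : (vsum dat (b + j) 0 (a + j)).1 = (vsum dat (b + j) 0 (a + 1)).1 + (vsum dat (b + j) (a + 1) (j - 1)).1 := by rw [t4]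
      have T4b : (vsum dat (b + j) 0 (a + j)).2 = (vsum dat (b + j) 0 (a + 1)).2 + (vsum dat (b + j) (a + 1) (j - 1)).2 := by rw [t4]
      rw [bBorder_eq dat j a b hj]
      by_cases hb0 : b = 0
      · have Z1a : (hsum dat a 0 b).1 = 0 := by rw [hb0]; rfl
        have Z1b : (hsum dat a 0 b).2 = 0 := by rw [hb0]; rfl
        have Z2a : (hsum dat (a + j) 0 b).1 = 0 := by rw [hb0]; rfl
        have Z2b : (hsum dat (a + j) 0 b).2 = 0 := by rw [hb0]; rfl
        rw [if_pos (show (b : Int) = 0 by omega)]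
        simp only [c1, c2, c3, r1, r2, k1, k2, k3, k4]
        split_ifs <;> omega
      · rw [if_neg (show ¬ (b : Int) = 0 by omega)]
        have c4 : ((b : Int) - 1) = ((b - 1 : Nat) : Int) := by omega
        have r3 : aGet rows (a : Int) ((b - 1 : Nat) : Int) = hsum dat a 0 b := by
          have h := hR a (by omega) (b - 1) (by omega)
          rw [show b - 1 + 1 = b by omega] at h
          exact h
        have r4 : aGet rows ((a + j : Nat) : Int) ((b - 1 : Nat) : Int)
            = hsum dat (a + j) 0 b := by
          have h := hR (a + j) (by omega) (b - 1) (by omega)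
          rw [show b - 1 + 1 = b by omega] at h
          exact h
        simp only [c1, c2, c3, c4, r1, r2, r3, r4, k1, k2, k3, k4]
        split_ifs <;> omega

-- ===== VERDICT (by name: the statement is the Claim_ definition above) =====
theorem not_brute3_spec : Claim_equal_not_brute3 := by
  intro dims dat _hdom hpre
  unfold Spec_not_brute3
  by_cases hpos : 0 < dims.1 ∧ 0 < dims.2
  · obtain ⟨h1, h2⟩ := hpos
    have hD0 : dims.1 = ((dims.1.toNat : Nat) : Int) := (Int.toNat_of_nonneg h1.le).symm
    have hD1 : dims.2 = ((dims.2.toNat : Nat) : Int) := (Int.toNat_of_nonneg h2.le).symm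
    have hphase := outer_inv dims dat dims.1.toNat dims.2.toNat hD0 hD1 (by omega)
      dims.1.toNat 0 (by omega) (by omega)
    simp only [Nat.cast_zero, List.range_zero, List.map_nil] at hphase
    have hp : phase1 dims dat =
        ((List.range dims.1.toNat).map (rowF dat dims.2.toNat),
         PySem.List.pyGetD dat 0 [] ::
           (List.range (dims.1.toNat - 1)).map (fun k => colF dat dims.2.toNat (k + 1))) := by
      unfold phase1; exact hphase
    rw [not_brute3_eq, hp]
    simp only [not_brute3_alt]
    apply PySem.List.foldl_congr_mem
    intro res i hi
    rw [PySem.List.mem_pyRange_neg_one] at hi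
    apply PySem.List.foldl_congr_mem
    intro res2 x hx
    rw [PySem.List.mem_pyRange_one] at hx
    have hmin1 := min_le_left dims.1 dims.2
    have hmin2 := min_le_right dims.1 dims.2
    obtain ⟨j, rfl⟩ : ∃ j : Nat, i = (j : Int) := ⟨i.toNat, (Int.toNat_of_nonneg (by omega)).symm⟩
    obtain ⟨a, rfl⟩ : ∃ a : Nat, x = (a : Int) := ⟨x.toNat, (Int.toNat_of_nonneg (by omega)).symm⟩
    exact yloop_eq dims dat _ _ dims.1.toNat dims.2.toNat hD0 hD1
      (fun a' ha' b' hb' => rows_get dat dims.1.toNat dims.2.toNat a' b' ha' hb')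
      (fun k hk b' hb' => cols_get dat dims.1.toNat dims.2.toNat k b' hk hb')
      j a (by omega) (by omega) _
      (fun y hy => by rw [PySem.List.mem_pyRange_one] at hy; omega) res2
  · have hm : min dims.1 dims.2 ≤ 0 := by
      rcases not_and_or.mp hpos with h | h
      · exact le_trans (min_le_left _ _) (by omega)
      · exact le_trans (min_le_right _ _) (by omega)
    simp [not_brute3, not_brute3_alt, PySem.List.pyRange_neg_one_eq_nil hm]
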